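-- pv_equiv track=rewrite | github.com/kevinddchen/project-euler | src/p336.py | number_to_alpha
-- ===== SOURCE A (Python) =====
-- def number_to_alpha(n, b):
--     """Turns arrangement as number into alphabetical representation."""
--     char_set = "ABCDEFGHIJK"
--     s = ""
--     for _ in range(b):
--         digit = n % b
--         s = char_set[digit] + s
--         n //= b
--     return s
-- ===== SOURCE B (Python) =====
-- def number_to_alpha(n, b):
--     """Turns arrangement as number into alphabetical representation."""
--     char_set = "ABCDEFGHIJK"
--     return ''.join(char_set[(n // b**i) % b] for i in reversed(range(b)))
-- ===== Notes on version B (the rewrite author's own statement) =====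
-- stated objective: simpler
-- what changed: B computes each digit independently in closed form as (n // b**i) % b over descending positions and joins them left-to-right, eliminating A's mutated running quotient and string prepending; Pre_ excludes only inputs where both programs raise IndexError (some base-b digit >= 11).
import Mathlib
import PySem

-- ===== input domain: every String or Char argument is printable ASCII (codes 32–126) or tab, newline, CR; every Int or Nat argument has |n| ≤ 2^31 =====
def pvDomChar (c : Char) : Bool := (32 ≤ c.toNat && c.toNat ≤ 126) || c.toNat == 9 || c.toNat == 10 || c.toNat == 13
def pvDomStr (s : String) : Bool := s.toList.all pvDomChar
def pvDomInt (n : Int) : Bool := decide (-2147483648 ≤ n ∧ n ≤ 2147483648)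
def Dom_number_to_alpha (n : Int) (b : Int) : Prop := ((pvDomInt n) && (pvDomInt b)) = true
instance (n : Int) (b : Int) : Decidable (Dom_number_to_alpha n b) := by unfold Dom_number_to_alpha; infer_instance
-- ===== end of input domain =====

-- B extracts each digit independently as (n // b**i) % b over descending positions,
-- replacing A's mutated running quotient and string prepending (objective: simpler).

-- ===== PORT A =====
-- Strings ported on the List Char side; char_set[digit] uses pyGetD, whose default is never
-- reached inside Pre_ (every digit is ≥ 0 since b > 0 in a non-empty loop, and < 11 by Pre_).
def number_to_alpha (n : Int) (b : Int) : String :=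
  let charSet : List Char := "ABCDEFGHIJK".toList
  let p := (PySem.List.pyRange 0 b 1).foldl
    (fun (p : List Char × Int) _ =>
      (PySem.List.pyGetD charSet (PySem.Int.mod p.2 b) 'A' :: p.1,
       PySem.Int.floordiv p.2 b))
    ([], n)
  String.mk p.1

-- ===== PORT B =====
-- Source B's generator over reversed(range(b)); i ≥ 0 in the range, so b**i is b ^ i.toNat.
def number_to_alpha_alt (n : Int) (b : Int) : String :=
  let charSet : List Char := "ABCDEFGHIJK".toList
  String.mk ((PySem.List.pyRange 0 b 1).reverse.map
    (fun i => PySem.List.pyGetD charSet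
      (PySem.Int.mod (PySem.Int.floordiv n (b ^ i.toNat)) b) 'A'))

-- ===== PRECONDITION & SPEC =====
-- Pre_ excludes exactly the inputs where both A and B raise IndexError: some base-b digit of n
-- among the low b positions is ≥ 11 = len("ABCDEFGHIJK"); positions ≥ 32 need not be checked
-- since |n| ≤ 2^31 on Dom (for b ≤ 0 the loop is empty and both always return "").
def pvPow (b : Int) : Nat → Int
  | 0 => 1
  | k + 1 => b * pvPow b k

def Pre_number_to_alpha (n : Int) (b : Int) : Prop :=
  ∀ k ∈ List.range 32, ((k : Int) < b → PySem.Int.mod (PySem.Int.floordiv n (pvPow b k)) b < 11)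
instance (n : Int) (b : Int) : Decidable (Pre_number_to_alpha n b) := by
  unfold Pre_number_to_alpha; infer_instance
def pvWitness_number_to_alpha : Int × Int := (5, 3)

def Spec_number_to_alpha (n : Int) (b : Int) (out : String) : Prop := out = number_to_alpha_alt n b
instance (n : Int) (b : Int) (out : String) : Decidable (Spec_number_to_alpha n b out) := by
  unfold Spec_number_to_alpha; infer_instance

-- ===== CLAIM (what is proved, stated in full; the proofs are below) =====
def Claim_equal_number_to_alpha : Prop := ∀ (n : Int) (b : Int), Dom_number_to_alpha n b → Pre_number_to_alpha n b → Spec_number_to_alpha n b (number_to_alpha n b)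

-- ===== LEMMAS AND PROOFS =====

-- floor division composes for a positive divisor
theorem pv_floordiv_floordiv (m b : Int) (hb : 0 < b) (j : Nat) :
    PySem.Int.floordiv (PySem.Int.floordiv m b) (b ^ j) = PySem.Int.floordiv m (b ^ (j + 1)) := by
  have hbj : (0 : Int) < b ^ j := pow_pos hb j
  have hbj1 : (0 : Int) < b ^ (j + 1) := pow_pos hb (j + 1)
  rw [PySem.Int.floordiv_eq_ediv_of_pos hb, PySem.Int.floordiv_eq_ediv_of_pos hbj,
      PySem.Int.floordiv_eq_ediv_of_pos hbj1, Int.ediv_ediv_of_nonneg (le_of_lt hb),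
      pow_succ, mul_comm (b ^ j) b]

-- peeling the most significant position off a reversed range
theorem pv_reverse_range_succ {α : Type} (f : Nat → α) (k : Nat) :
    (List.range (k + 1)).reverse.map f
    = (List.range k).reverse.map (fun j => f (j + 1)) ++ [f 0] := by
  rw [List.range_succ_eq_map]
  simp [List.map_reverse, List.map_map, Function.comp]

-- a fold that ignores its elements is iteration of the step
theorem pv_foldl_const {α β : Type} (g : α → α) (l : List β) (init : α) :
    l.foldl (fun a _ => g a) init = g^[l.length] init := by
  induction l generalizing init with
  | nil => rfl
  | cons x xs ih => simp [List.foldl_cons, ih, Function.iterate_succ_apply]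

-- invariant of A's loop: after k steps the accumulator holds the low k digits (most significant
-- first) and the running quotient is n // b^k
theorem pv_iterA (ch : Int → Char) (b : Int) (hb : 0 < b) (k : Nat) :
    ∀ (m : Int) (acc : List Char),
    (fun p : List Char × Int => (ch p.2 :: p.1, PySem.Int.floordiv p.2 b))^[k] (acc, m)
    = ((List.range k).reverse.map (fun j => ch (PySem.Int.floordiv m (b ^ j))) ++ acc,
       PySem.Int.floordiv m (b ^ k)) := by
  induction k with
  | zero => intro m acc; simp
  | succ k ih =>
    intro m acc
    rw [Function.iterate_succ_apply]
    simp only []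
    rw [ih (PySem.Int.floordiv m b) (ch m :: acc)]
    refine Prod.ext ?_ (pv_floordiv_floordiv m b hb k)
    simp only []
    rw [pv_reverse_range_succ]
    have hfun : (fun j => ch (PySem.Int.floordiv m (b ^ (j + 1))))
        = fun j => ch (PySem.Int.floordiv (PySem.Int.floordiv m b) (b ^ j)) := by
      funext j; rw [pv_floordiv_floordiv m b hb j]
    rw [hfun]
    simp

theorem number_to_alpha_eq_alt (n b : Int) : number_to_alpha n b = number_to_alpha_alt n b := by
  simp only [number_to_alpha, number_to_alpha_alt]
  rcases (by omega : b ≤ 0 ∨ 0 < b) with hb | hb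
  · rw [PySem.List.pyRange_one_eq_nil (by omega)]
    simp
  · rw [pv_foldl_const (fun p : List Char × Int =>
        (PySem.List.pyGetD "ABCDEFGHIJK".toList (PySem.Int.mod p.2 b) 'A' :: p.1,
         PySem.Int.floordiv p.2 b))]
    rw [pv_iterA (fun m => PySem.List.pyGetD "ABCDEFGHIJK".toList (PySem.Int.mod m b) 'A')
        b hb (PySem.List.pyRange 0 b 1).length n []]
    simp only [List.append_nil]
    rw [PySem.List.pyRange_one]
    simp only [List.length_map, List.length_range]
    congr 1
    rw [List.map_reverse, List.map_reverse, List.map_map]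
    congr 1
    apply List.map_congr_left
    intro k hk
    simp [Function.comp]

-- ===== VERDICT (by name: the statement is the Claim_ definition above) =====
theorem number_to_alpha_spec : Claim_equal_number_to_alpha := by
  intro n b _ _
  unfold Spec_number_to_alpha
  exact number_to_alpha_eq_alt n b
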